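-- pv_equiv track=rewrite | github.com/dweng0/POPPINS | scripts/grill.py | extract_scenario
-- ===== SOURCE A (Python) =====
-- def extract_scenario(text: str) -> str:
--     lines = text.split("\n")
--     scenario_lines = []
--     in_scenario = False
--     for line in lines:
--         if line.strip().startswith("Scenario:"):
--             in_scenario = True
--         if in_scenario:
--             if line.strip() == "GRILL_COMPLETE":
--                 continue
--             scenario_lines.append(line)
--     return "\n".join(scenario_lines).strip()
-- ===== SOURCE B (Python) =====
-- def extract_scenario(text: str) -> str:
--     # Stage 1: remove GRILL_COMPLETE sentinel lines everywhere (a sentinel line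
--     # can never be the "Scenario:" marker, so this cannot change the block start).
--     kept = [l for l in text.split("\n") if l.strip() != "GRILL_COMPLETE"]
--     # Stage 2: trim lines off the front until the marker line (or nothing is left).
--     while kept and not kept[0].strip().startswith("Scenario:"):
--         kept = kept[1:]
--     return "\n".join(kept).strip()
-- ===== Notes on version B (the rewrite author's own statement) =====
-- stated objective: alternative
-- what changed: Instead of a single stateful in_scenario scan, B first filters the sentinel lines out of the whole input and then trims lines off the front of that filtered list until the marker line, relying on the fact that a sentinel line can never be the marker; the stage order is reversed relative to A.
import Mathlib
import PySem

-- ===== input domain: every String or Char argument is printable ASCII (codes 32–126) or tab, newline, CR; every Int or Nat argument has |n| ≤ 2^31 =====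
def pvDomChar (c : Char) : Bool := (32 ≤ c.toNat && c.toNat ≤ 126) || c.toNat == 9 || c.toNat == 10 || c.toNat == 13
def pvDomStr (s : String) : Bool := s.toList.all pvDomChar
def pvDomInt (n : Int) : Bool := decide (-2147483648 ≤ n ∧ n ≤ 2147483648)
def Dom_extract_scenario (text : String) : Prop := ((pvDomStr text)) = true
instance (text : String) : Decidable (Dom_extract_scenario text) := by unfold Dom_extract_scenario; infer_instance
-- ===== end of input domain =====

-- B reverses A's stage order: it filters the sentinel lines out of the whole input first
-- (a sentinel line can never be the marker line) and then trims the front up to the marker;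
-- objective: alternative decomposition, same cost.

-- ===== PORT A =====
-- line.strip().startswith("Scenario:") and line.strip() != "GRILL_COMPLETE"
def pvScen (l : String) : Bool := PySem.Str.startswith (PySem.Str.strip l) "Scenario:"
def pvKeep (l : String) : Bool := !(PySem.Str.strip l == "GRILL_COMPLETE")
-- A's loop body over the state (scenario_lines, in_scenario)
def pvStep (st : List String × Bool) (line : String) : List String × Bool :=
  let in_scenario := if pvScen line then true else st.2
  if in_scenario then
    if pvKeep line then (st.1 ++ [line], in_scenario) else (st.1, in_scenario)
  else (st.1, in_scenario)

-- sep "\n" ≠ "" so split? never returns none; getD [] is unreachable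
def extract_scenario (text : String) : String :=
  let lines := (PySem.Str.split? text "\n").getD []
  let st := lines.foldl pvStep ([], false)
  PySem.Str.strip (PySem.Str.join "\n" st.1)

-- ===== PORT B =====
-- B's while loop: drop lines from the front until the marker (or the list is empty)
def pvTrim : List String → List String
  | [] => []
  | l :: rest => if pvScen l then l :: rest else pvTrim rest

def extract_scenario_alt (text : String) : String :=
  let kept := ((PySem.Str.split? text "\n").getD []).filter pvKeep
  PySem.Str.strip (PySem.Str.join "\n" (pvTrim kept))

-- ===== PRECONDITION & SPEC =====
def Spec_extract_scenario (text : String) (out : String) : Prop := out = extract_scenario_alt text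
instance (text : String) (out : String) : Decidable (Spec_extract_scenario text out) := by unfold Spec_extract_scenario; infer_instance

-- ===== CLAIM =====
def Claim_equal_extract_scenario : Prop := ∀ (text : String), Dom_extract_scenario text → Spec_extract_scenario text (extract_scenario text)

-- ===== LEMMAS AND PROOFS =====

-- a marker line is never a sentinel line
lemma pvScen_keep (l : String) : pvScen l = true → pvKeep l = true := by
  unfold pvScen pvKeep
  intro h
  by_cases hs : PySem.Str.strip l = "GRILL_COMPLETE"
  · rw [hs] at h
    exact absurd h (by decide)
  · simp [hs]

lemma pvFold_true (lines : List String) (acc : List String) :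
    lines.foldl pvStep (acc, true) = (acc ++ lines.filter pvKeep, true) := by
  induction lines generalizing acc with
  | nil => simp
  | cons x t ih =>
      rw [List.foldl_cons]
      have hstep : pvStep (acc, true) x =
          (if pvKeep x then (acc ++ [x], true) else (acc, true)) := by
        unfold pvStep
        by_cases h : pvScen x <;> by_cases hk : pvKeep x <;> simp [h, hk]
      rw [hstep]
      by_cases hk : pvKeep x <;> simp [hk, ih]

lemma pvFold_false (lines : List String) :
    (lines.foldl pvStep ([], false)).1 = pvTrim (lines.filter pvKeep) := by
  induction lines with
  | nil => simp [pvTrim]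
  | cons x t ih =>
      rw [List.foldl_cons]
      by_cases h : pvScen x
      · have hk : pvKeep x = true := pvScen_keep x h
        have hstep : pvStep ([], false) x = ([x], true) := by
          unfold pvStep; simp [h, hk]
        rw [hstep, pvFold_true]
        simp [List.filter_cons, hk, pvTrim, h]
      · have hstep : pvStep ([], false) x = ([], false) := by
          unfold pvStep; simp [h]
        rw [hstep, ih]
        by_cases hk : pvKeep x <;> simp [List.filter_cons, hk, pvTrim, h]

-- ===== VERDICT =====
theorem extract_scenario_spec : Claim_equal_extract_scenario := by
  intro text _
  show extract_scenario text = extract_scenario_alt text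
  simp only [extract_scenario, extract_scenario_alt]
  rw [pvFold_false]
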